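-- pv_equiv track=rewrite | github.com/ZsZJ/blockchain | script.py | mod10
-- ===== SOURCE A (Python) =====
-- def calculate_mod10(x, y):
--     tmplist = []
--     for i in range(0, 10):
--         tmplist.append(str((int(x[i]) + int(y[i])) % 10))
--     return tmplist
--
-- def mod10(a, row):
--     if len(a) > 0:
--         if len(row) > 0:
--             row = calculate_mod10(row, a[0:10])
--             del a[0:10]
--             return mod10(a, row)
--         else:
--             row = calculate_mod10(a[0:10], a[10:20])
--             del a[0:20]
--             return mod10(a, row)
--     else:
--         return row
-- ===== SOURCE B (Python) =====
-- # B: accumulate integer column sums in one pass and take a single final mod-10,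
-- # instead of A's per-chunk pairwise re-mod with string round-trips.
-- # Return-value equivalence only: A empties its argument list `a` in place; B does not mutate it.
-- def mod10(a, row):
--     if not a:
--         return row
--     cols = [int(row[i]) for i in range(10)] if row else [0] * 10
--     for j in range(0, len(a), 10):
--         cols = [cols[i] + int(a[j + i]) for i in range(10)]
--     return [str(c % 10) for c in cols]
-- ===== Notes on version B (the rewrite author's own statement) =====
-- stated objective: alternative
-- what changed: Replaces A's recursion that re-mods and str/int round-trips a 10-digit row after every chunk with a single pass that accumulates integer column sums and applies one final mod-10/str per column; B does not mutate the argument list a (A empties it in place), return values are proved equal.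
import Mathlib
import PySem

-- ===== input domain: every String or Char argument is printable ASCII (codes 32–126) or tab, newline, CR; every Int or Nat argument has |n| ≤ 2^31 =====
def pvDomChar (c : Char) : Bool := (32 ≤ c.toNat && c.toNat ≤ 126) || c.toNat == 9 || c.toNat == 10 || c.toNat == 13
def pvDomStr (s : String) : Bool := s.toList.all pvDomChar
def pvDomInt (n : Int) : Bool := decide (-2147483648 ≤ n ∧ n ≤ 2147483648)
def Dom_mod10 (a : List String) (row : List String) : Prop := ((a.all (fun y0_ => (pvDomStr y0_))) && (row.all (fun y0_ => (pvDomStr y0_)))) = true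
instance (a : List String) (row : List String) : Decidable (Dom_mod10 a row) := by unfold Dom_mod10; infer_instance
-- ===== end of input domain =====

-- B accumulates integer column sums in one pass with a single final mod 10, instead of A's
-- per-chunk pairwise re-mod with str/int round-trips; equivalence is about the RETURN value only
-- (Python A empties its argument `a` in place, B does not mutate it).

-- ===== PORT A =====
def calcMod10 (x : List String) (y : List String) : List String :=
  (PySem.List.pyRange 0 10 1).foldl (fun tmplist i =>
    tmplist ++ [PySem.Int.toStr (PySem.Int.mod
      (((PySem.List.pyGet? x i).bind PySem.Int.ofStr?).getD 0 +
       ((PySem.List.pyGet? y i).bind PySem.Int.ofStr?).getD 0) 10)]) []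

def mod10 (a : List String) (row : List String) : List String :=
  if 0 < a.length then
    if 0 < row.length then
      mod10 (PySem.List.slice a (some 10) none)
            (calcMod10 row (PySem.List.slice a none (some 10)))
    else
      mod10 (PySem.List.slice a (some 20) none)
            (calcMod10 (PySem.List.slice a none (some 10)) (PySem.List.slice a (some 10) (some 20)))
  else row
termination_by a.length
decreasing_by
  · simp [PySem.List.slice]; omega
  · simp [PySem.List.slice]; omega

-- ===== PORT B =====
def mod10_alt (a : List String) (row : List String) : List String :=
  if a = [] then row
  else
    let cols0 : List Int :=
      if row ≠ [] then
        (PySem.List.pyRange 0 10 1).map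
          (fun i => ((PySem.List.pyGet? row i).bind PySem.Int.ofStr?).getD 0)
      else List.replicate 10 0
    let cols := (PySem.List.pyRange 0 (a.length : Int) 10).foldl
      (fun cols j => (PySem.List.pyRange 0 10 1).map
        (fun i => PySem.List.pyGetD cols i 0 +
          ((PySem.List.pyGet? a (j + i)).bind PySem.Int.ofStr?).getD 0)) cols0
    cols.map (fun c => PySem.Int.toStr (PySem.Int.mod c 10))

-- ===== PRECONDITION & SPEC =====
-- Pre_ excludes exactly the inputs where Python A raises: a chunk/row shorter than the 10 indices
-- calculate_mod10 reads (IndexError) or a consumed string int() cannot parse (ValueError).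
def Pre_mod10 (a : List String) (row : List String) : Prop :=
  a.length % 10 = 0 ∧ (∀ s ∈ a, (PySem.Int.ofStr? s).isSome = true) ∧
  (row = [] → (a = [] ∨ 20 ≤ a.length)) ∧
  (row ≠ [] → (a = [] ∨ (10 ≤ row.length ∧ ∀ s ∈ row.take 10, (PySem.Int.ofStr? s).isSome = true)))
instance (a : List String) (row : List String) : Decidable (Pre_mod10 a row) := by
  unfold Pre_mod10; infer_instance

def pvWitness_mod10 : List String × List String :=
  (["1","2","3","4","5","6","7","8","9","0","5","5","5","5","5","5","5","5","5","5"], [])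

def Spec_mod10 (a : List String) (row : List String) (out : List String) : Prop := out = mod10_alt a row
instance (a : List String) (row : List String) (out : List String) : Decidable (Spec_mod10 a row out) := by unfold Spec_mod10; infer_instance

-- ===== CLAIM (what is proved, stated in full; the proofs are below) =====
def Claim_equal_mod10 : Prop := ∀ (a : List String) (row : List String), Dom_mod10 a row → Pre_mod10 a row → Spec_mod10 a row (mod10 a row)

-- ===== LEMMAS AND PROOFS =====

-- value of an element read by int(x[i]) (0 when out of range / unparsable; only used under Pre_)
def gv (x : List String) (i : Int) : Int := ((PySem.List.pyGet? x i).bind PySem.Int.ofStr?).getD 0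

-- column sum of the successive 10-chunks of a
def colsum (a : List String) (i : Int) : Int :=
  if a = [] then 0 else gv a i + colsum (a.drop 10) i
termination_by a.length
decreasing_by
  have : a ≠ [] := by assumption
  have := List.length_pos_iff.mpr this
  simp; omega

lemma gv_take (a : List String) (n : Nat) (i : Int) (h0 : 0 ≤ i) (h : i.toNat < n) :
    gv (a.take n) i = gv a i := by
  unfold gv
  rw [PySem.List.pyGet?_of_nonneg _ h0, PySem.List.pyGet?_of_nonneg _ h0,
    List.getElem?_take_of_lt h]

lemma gv_drop (a : List String) (n : Nat) (i : Int) (h0 : 0 ≤ i) :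
    gv (a.drop n) i = gv a (n + i) := by
  unfold gv
  rw [PySem.List.pyGet?_of_nonneg _ h0, PySem.List.pyGet?_of_nonneg _ (by omega),
    List.getElem?_drop]
  have h : (n + i).toNat = n + i.toNat := by omega
  rw [h]

lemma mod10_add_l (x y : Int) :
    PySem.Int.mod (PySem.Int.mod x 10 + y) 10 = PySem.Int.mod (x + y) 10 := by
  rw [PySem.Int.mod_eq_emod_of_pos (b := 10) (by norm_num),
    PySem.Int.mod_eq_emod_of_pos (b := 10) (by norm_num),
    PySem.Int.mod_eq_emod_of_pos (b := 10) (by norm_num)]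
  omega

lemma ofStr_toStr_digit (d : Int) (h0 : 0 ≤ d) (h1 : d < 10) :
    PySem.Int.ofStr? (PySem.Int.toStr d) = some d := by
  interval_cases d <;> decide

lemma mod_bounds (x : Int) : 0 ≤ PySem.Int.mod x 10 ∧ PySem.Int.mod x 10 < 10 := by
  rw [PySem.Int.mod_eq_emod_of_pos (b := 10) (by norm_num)]; omega

lemma calc_char (x y : List String) :
    calcMod10 x y = (PySem.List.pyRange 0 10 1).map
      (fun i => PySem.Int.toStr (PySem.Int.mod (gv x i + gv y i) 10)) := by
  unfold calcMod10 gv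
  rw [PySem.List.foldl_append_singleton_eq_map]
  simp

lemma pyRange_ten_cons (j b : Int) (h : j < b) :
    PySem.List.pyRange j b 10 = j :: PySem.List.pyRange (j + 10) b 10 := by
  rw [PySem.List.pyRange_of_pos _ _ (by norm_num : (0:Int) < 10),
      PySem.List.pyRange_of_pos _ _ (by norm_num : (0:Int) < 10)]
  rw [if_pos h]
  by_cases h2 : j + 10 < b
  · rw [if_pos h2]
    have hc : ((b - j + 10 - 1) / 10).toNat = ((b - (j + 10) + 10 - 1) / 10).toNat + 1 := by omega
    rw [hc, List.range_succ_eq_map]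
    simp [List.map_map, Function.comp]
    intro m _; ring
  · rw [if_neg h2]
    have hc : ((b - j + 10 - 1) / 10).toNat = 1 := by omega
    rw [hc]
    simp

lemma mem_R10 (i : Int) (hi : i ∈ PySem.List.pyRange 0 10 1) : 0 ≤ i ∧ i < 10 := by
  have := (PySem.List.mem_pyRange_iff_of_pos (by norm_num : (0:Int) < 1) i).mp hi
  exact ⟨this.1, this.2.1⟩

lemma colsum_cons (a : List String) (hne : a ≠ []) (i : Int) :
    colsum a i = gv a i + colsum (a.drop 10) i := by
  rw [colsum, if_neg hne]

lemma R10_getElem (k : Nat) (hk : k < 10) :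
    (PySem.List.pyRange 0 10 1)[k]? = some (k : Int) := by
  have h : PySem.List.pyRange 0 10 1 = [0,1,2,3,4,5,6,7,8,9] := by decide
  rw [h]; interval_cases k <;> rfl

lemma pyGet_map_R10 {β : Type} (f : Int → β) (i : Int) (h0 : 0 ≤ i) (h10 : i < 10) :
    PySem.List.pyGet? ((PySem.List.pyRange 0 10 1).map f) i = some (f i) := by
  rw [PySem.List.pyGet?_of_nonneg _ h0, List.getElem?_map, R10_getElem i.toNat (by omega)]
  have h : ((i.toNat : Nat) : Int) = i := by omega
  rw [h]; rfl

lemma hslice_from_n (a : List String) (n : Nat) :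
    PySem.List.slice a (some (n : Int)) none = a.drop n := by
  have hn : ¬((n : Int) < 0) := by omega
  simp [PySem.List.slice, PySem.List.clampIdx, hn]
  by_cases h : n ≤ a.length
  · rw [Nat.min_eq_left h, List.take_of_length_le (by simp)]
  · rw [Nat.min_eq_right (by omega)]
    simp [List.drop_eq_nil_of_le (by omega : a.length ≤ n)]

lemma hslice_from10 (a : List String) : PySem.List.slice a (some 10) none = a.drop 10 := by
  have h := hslice_from_n a 10
  norm_num at h
  exact h

lemma hslice_from20 (a : List String) : PySem.List.slice a (some 20) none = a.drop 20 := by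
  have h := hslice_from_n a 20
  norm_num at h
  exact h

lemma hslice_to10 (a : List String) : PySem.List.slice a none (some 10) = a.take 10 := by
  simp [PySem.List.slice, PySem.List.clampIdx]

lemma hslice_mid (a : List String) :
    PySem.List.slice a (some 10) (some 20) = (a.drop 10).take 10 := by
  have h := PySem.List.slice_natCast (xs := a) (a := 10) (b := 20)
  simpa using h

lemma mod10_char (a row : List String) (r : Int → Int)
    (hlen : a.length % 10 = 0) (hne : a ≠ [])
    (hr : ∀ i : Int, 0 ≤ i → i < 10 →
      (PySem.List.pyGet? row i).bind PySem.Int.ofStr? = some (r i)) :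
    mod10 a row = (PySem.List.pyRange 0 10 1).map
      (fun i => PySem.Int.toStr (PySem.Int.mod (r i + colsum a i) 10)) := by
  have hlpos : 0 < a.length := List.length_pos_iff.mpr hne
  have hlen10 : 10 ≤ a.length := by omega
  have hrow : 0 < row.length := by
    rcases row with _ | ⟨s, rest⟩
    · have := hr 0 le_rfl (by norm_num)
      simp [PySem.List.pyGet?] at this
    · simp
  rw [mod10, if_pos hlpos, if_pos hrow, hslice_from10, hslice_to10, calc_char]
  have hcc : (PySem.List.pyRange 0 10 1).map
      (fun i => PySem.Int.toStr (PySem.Int.mod (gv row i + gv (a.take 10) i) 10))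
      = (PySem.List.pyRange 0 10 1).map
        (fun i => PySem.Int.toStr (PySem.Int.mod (r i + gv a i) 10)) := by
    apply List.map_congr_left; intro i hi
    obtain ⟨h0, h10⟩ := mem_R10 i hi
    rw [gv_take a 10 i h0 (by omega)]
    have hg : gv row i = r i := by unfold gv; rw [hr i h0 h10]; rfl
    rw [hg]
  rw [hcc]
  have hr' : ∀ i : Int, 0 ≤ i → i < 10 →
      (PySem.List.pyGet? ((PySem.List.pyRange 0 10 1).map
        (fun i => PySem.Int.toStr (PySem.Int.mod (r i + gv a i) 10))) i).bind PySem.Int.ofStr?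
      = some (PySem.Int.mod (r i + gv a i) 10) := by
    intro i h0 h10
    rw [pyGet_map_R10 _ i h0 h10]
    obtain ⟨hm0, hm10⟩ := mod_bounds (r i + gv a i)
    simp only [Option.bind_some]
    exact ofStr_toStr_digit _ hm0 hm10
  by_cases hd : a.drop 10 = []
  · rw [hd, mod10]
    simp only [List.length_nil, lt_irrefl, if_false]
    apply List.map_congr_left; intro i hi
    rw [colsum_cons a hne i, hd, colsum, if_pos rfl, add_zero]
  · rw [mod10_char (a.drop 10) _ (fun i => PySem.Int.mod (r i + gv a i) 10)
      (by simp; omega) hd hr']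
    apply List.map_congr_left; intro i _
    rw [colsum_cons a hne i, mod10_add_l]
    ring_nf
termination_by a.length
decreasing_by simp; omega

lemma foldB (a : List String) (f : Int → Int) (j0 : Nat) :
    (PySem.List.pyRange (j0 : Int) (a.length : Int) 10).foldl
      (fun cols j => (PySem.List.pyRange 0 10 1).map
        (fun i => PySem.List.pyGetD cols i 0 +
          ((PySem.List.pyGet? a (j + i)).bind PySem.Int.ofStr?).getD 0))
      ((PySem.List.pyRange 0 10 1).map f)
    = (PySem.List.pyRange 0 10 1).map (fun i => f i + colsum (a.drop j0) i) := by
  by_cases h : (j0 : Int) < (a.length : Int)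
  · rw [pyRange_ten_cons _ _ h]
    simp only [List.foldl_cons]
    have hstep : (PySem.List.pyRange 0 10 1).map
        (fun i => PySem.List.pyGetD ((PySem.List.pyRange 0 10 1).map f) i 0 +
          ((PySem.List.pyGet? a ((j0 : Int) + i)).bind PySem.Int.ofStr?).getD 0)
        = (PySem.List.pyRange 0 10 1).map (fun i => (fun i => f i + gv a ((j0 : Int) + i)) i) := by
      apply List.map_congr_left; intro i hi
      obtain ⟨h0, h10⟩ := mem_R10 i hi
      rw [PySem.List.pyGetD_map_pyRange_of_nonneg f 10 i 0 h0 h10]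
      rfl
    rw [hstep]
    have hrec := foldB a (fun i => f i + gv a ((j0 : Int) + i)) (j0 + 10)
    have hcast : ((j0 + 10 : Nat) : Int) = (j0 : Int) + 10 := by push_cast; ring
    rw [hcast] at hrec
    rw [hrec]
    apply List.map_congr_left; intro i hi
    obtain ⟨h0, _⟩ := mem_R10 i hi
    have hne : a.drop j0 ≠ [] := by
      intro hcon
      have := congrArg List.length hcon
      simp at this; omega
    rw [colsum_cons _ hne i, gv_drop a j0 i h0]
    have hdd : (a.drop j0).drop 10 = a.drop (j0 + 10) := by
      rw [List.drop_drop]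
    rw [hdd]
    ring
  · have hempty : PySem.List.pyRange (j0 : Int) (a.length : Int) 10 = [] := by
      rw [PySem.List.pyRange_of_pos _ _ (by norm_num : (0:Int) < 10), if_neg h]
      simp
    rw [hempty]
    simp only [List.foldl_nil]
    apply List.map_congr_left; intro i _
    have hd : a.drop j0 = [] := by
      apply List.drop_eq_nil_of_le; omega
    rw [hd, colsum, if_pos rfl]
    ring
termination_by a.length - j0
decreasing_by omega

lemma replicate_R10 : List.replicate 10 (0:Int) = (PySem.List.pyRange 0 10 1).map (fun _ => (0:Int)) := by
  decide

lemma foldB0 (a : List String) (f : Int → Int) :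
    (PySem.List.pyRange 0 (a.length : Int) 10).foldl
      (fun cols j => (PySem.List.pyRange 0 10 1).map
        (fun i => PySem.List.pyGetD cols i 0 +
          ((PySem.List.pyGet? a (j + i)).bind PySem.Int.ofStr?).getD 0))
      ((PySem.List.pyRange 0 10 1).map f)
    = (PySem.List.pyRange 0 10 1).map (fun i => f i + colsum a i) := by
  have h := foldB a f 0
  simp only [Nat.cast_zero, List.drop_zero] at h
  exact h

lemma alt_char (a row : List String) (hae : a ≠ []) (hre : row ≠ []) :
    mod10_alt a row = (PySem.List.pyRange 0 10 1).map
      (fun i => PySem.Int.toStr (PySem.Int.mod (gv row i + colsum a i) 10)) := by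
  simp only [mod10_alt, if_neg hae, if_pos hre]
  rw [show (fun i => ((PySem.List.pyGet? row i).bind PySem.Int.ofStr?).getD 0)
        = (fun i => gv row i) from rfl]
  rw [foldB0 a (fun i => gv row i), List.map_map]
  rfl

lemma alt_char0 (a : List String) (hae : a ≠ []) :
    mod10_alt a [] = (PySem.List.pyRange 0 10 1).map
      (fun i => PySem.Int.toStr (PySem.Int.mod (colsum a i) 10)) := by
  simp only [mod10_alt, if_neg hae, ne_eq, not_true_eq_false, if_false, replicate_R10]
  rw [foldB0 a (fun _ => 0), List.map_map]
  apply List.map_congr_left; intro i _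
  simp

lemma colsum_two (a : List String) (hlen20 : 20 ≤ a.length) (i : Int) (h0 : 0 ≤ i) :
    colsum a i = gv a i + gv a (10 + i) + colsum (a.drop 20) i := by
  have h1 : a ≠ [] := by intro h; rw [h] at hlen20; simp at hlen20
  have h2 : a.drop 10 ≠ [] := by
    intro h; have := congrArg List.length h; simp at this; omega
  rw [colsum_cons a h1 i, colsum_cons _ h2 i, gv_drop a 10 i h0, List.drop_drop]
  norm_num
  ring

-- ===== VERDICT (by name: the statement is the Claim_ definition above) =====
theorem mod10_spec : Claim_equal_mod10 := by
  intro a row _ hpre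
  obtain ⟨hlen, _, hrow0, hrow1⟩ := hpre
  unfold Spec_mod10
  by_cases hae : a = []
  · subst hae
    rw [mod10]
    simp [mod10_alt]
  · have hlpos : 0 < a.length := List.length_pos_iff.mpr hae
    by_cases hre : row = []
    · subst hre
      rcases hrow0 rfl with h | h20
      · exact absurd h hae
      rw [mod10, if_pos hlpos, if_neg (by simp), hslice_from20, hslice_to10, hslice_mid,
        calc_char, alt_char0 a hae]
      have hcc : (PySem.List.pyRange 0 10 1).map
          (fun i => PySem.Int.toStr (PySem.Int.mod (gv (a.take 10) i + gv ((a.drop 10).take 10) i) 10))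
          = (PySem.List.pyRange 0 10 1).map
            (fun i => PySem.Int.toStr (PySem.Int.mod (gv a i + gv a (10 + i)) 10)) := by
        apply List.map_congr_left; intro i hi
        obtain ⟨h0, h10⟩ := mem_R10 i hi
        rw [gv_take a 10 i h0 (by omega), gv_take (a.drop 10) 10 i h0 (by omega),
          gv_drop a 10 i h0]
        norm_num
      rw [hcc]
      have hr' : ∀ i : Int, 0 ≤ i → i < 10 →
          (PySem.List.pyGet? ((PySem.List.pyRange 0 10 1).map
            (fun i => PySem.Int.toStr (PySem.Int.mod (gv a i + gv a (10 + i)) 10))) i).bind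
              PySem.Int.ofStr?
          = some (PySem.Int.mod (gv a i + gv a (10 + i)) 10) := by
        intro i h0 h10
        rw [pyGet_map_R10 _ i h0 h10]
        obtain ⟨hm0, hm10⟩ := mod_bounds (gv a i + gv a (10 + i))
        simp only [Option.bind_some]
        exact ofStr_toStr_digit _ hm0 hm10
      by_cases hd : a.drop 20 = []
      · rw [hd, mod10]
        simp only [List.length_nil, lt_irrefl, if_false]
        apply List.map_congr_left; intro i hi
        obtain ⟨h0, _⟩ := mem_R10 i hi
        rw [colsum_two a h20 i h0, hd, colsum, if_pos rfl, add_zero]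
      · rw [mod10_char (a.drop 20) _ (fun i => PySem.Int.mod (gv a i + gv a (10 + i)) 10)
          (by simp; omega) hd hr']
        apply List.map_congr_left; intro i hi
        obtain ⟨h0, _⟩ := mem_R10 i hi
        rw [colsum_two a h20 i h0, mod10_add_l]
    · rcases hrow1 hre with h | ⟨hrl, hri⟩
      · exact absurd h hae
      have hr : ∀ i : Int, 0 ≤ i → i < 10 →
          (PySem.List.pyGet? row i).bind PySem.Int.ofStr? = some (gv row i) := by
        intro i h0 h10
        have hidx : i.toNat < row.length := by omega
        have hlt : i.toNat < (row.take 10).length := by simp; omega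
        have hm0 : (row.take 10)[i.toNat] ∈ row.take 10 := List.getElem_mem hlt
        have hg : (row.take 10)[i.toNat] = row[i.toNat] := List.getElem_take
        rw [hg] at hm0
        have hs := hri _ hm0
        unfold gv
        rw [PySem.List.pyGet?_of_nonneg _ h0, List.getElem?_eq_getElem hidx]
        simp only [Option.bind_some]
        rcases ho : PySem.Int.ofStr? row[i.toNat] with _ | v
        · rw [ho] at hs; simp at hs
        · rfl
      rw [mod10_char a row (fun i => gv row i) hlen hae hr, alt_char a row hae hre]
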